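-- pv_equiv track=rewrite | github.com/WLONEGI/Sol_LeWitt | backend/src/core/workflow/nodes/supervisor.py | _find_current_step
-- ===== SOURCE A (Python) =====
-- from typing import Any, Literal
--
-- def _find_current_step(plan: list[dict[str, Any]]) -> tuple[int, dict[str, Any] | None]:
--     for index, step in enumerate(plan):
--         if step.get("status") == "in_progress":
--             return index, step
--     for index, step in enumerate(plan):
--         if step.get("status") == "pending":
--             return index, step
--     return -1, None
-- ===== SOURCE B (Python) =====
-- from typing import Any
--
-- def _find_current_step(plan: list[dict[str, Any]]) -> tuple[int, dict[str, Any] | None]: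
--     first_pending = None
--     for index, step in enumerate(plan):
--         status = step.get("status")
--         if status == "in_progress":
--             return index, step
--         if status == "pending" and first_pending is None:
--             first_pending = (index, step)
--     return first_pending if first_pending is not None else (-1, None)
-- ===== Notes on version B (the rewrite author's own statement) =====
-- stated objective: alternative
-- what changed: Replaced A's two sequential scans (one for 'in_progress', then one for 'pending') by a single enumerate pass that short-circuits on 'in_progress' while remembering the first 'pending' step.
import Mathlib
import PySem

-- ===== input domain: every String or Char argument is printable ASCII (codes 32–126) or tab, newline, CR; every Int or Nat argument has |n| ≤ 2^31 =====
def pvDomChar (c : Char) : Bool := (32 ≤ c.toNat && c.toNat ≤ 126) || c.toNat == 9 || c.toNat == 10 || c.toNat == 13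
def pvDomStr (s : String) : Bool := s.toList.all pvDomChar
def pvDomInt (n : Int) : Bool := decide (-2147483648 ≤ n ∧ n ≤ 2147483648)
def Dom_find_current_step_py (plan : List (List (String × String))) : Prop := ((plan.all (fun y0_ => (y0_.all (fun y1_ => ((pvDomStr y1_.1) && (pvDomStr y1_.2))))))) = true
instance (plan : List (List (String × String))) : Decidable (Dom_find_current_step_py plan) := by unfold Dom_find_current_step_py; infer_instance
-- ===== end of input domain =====

-- B collapses A's two sequential scans into one pass that remembers the first pending step (alternative decomposition; return value only).


-- ===== PORT A =====
-- one 'for index, step in enumerate(plan): if step.get("status") == st: return index, step' scan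
def pvScanA (st : String) (plan : List (List (String × String))) (i : Int) :
    Option (Int × (Option (List (String × String)))) :=
  match plan with
  | [] => none
  | step :: rest =>
    if (PySem.Dict.mk step).get? "status" = some st then some (i, some step)
    else pvScanA st rest (i + 1)

def find_current_step_py (plan : List (List (String × String))) : Int × (Option (List (String × String))) :=
  match pvScanA "in_progress" plan 0 with
  | some r => r
  | none =>
    match pvScanA "pending" plan 0 with
    | some r => r
    | none => (-1, none)

-- ===== PORT B =====
-- single pass: return immediately on 'in_progress', record the first 'pending'
def pvScanB (plan : List (List (String × String))) (i : Int)
    (pend : Option (Int × (Option (List (String × String))))) :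
    Int × (Option (List (String × String))) :=
  match plan with
  | [] => pend.getD (-1, none)
  | step :: rest =>
    let status := (PySem.Dict.mk step).get? "status"
    if status = some "in_progress" then (i, some step)
    else
      pvScanB rest (i + 1)
        (if status = some "pending" ∧ pend = none then some (i, some step) else pend)

def find_current_step_py_alt (plan : List (List (String × String))) : Int × (Option (List (String × String))) :=
  pvScanB plan 0 none

-- ===== PRECONDITION & SPEC =====
def Spec_find_current_step_py (plan : List (List (String × String))) (out : Int × (Option (List (String × String)))) : Prop := out = find_current_step_py_alt plan
instance (plan : List (List (String × String))) (out : Int × (Option (List (String × String)))) : Decidable (Spec_find_current_step_py plan out) := by unfold Spec_find_current_step_py; infer_instance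

-- ===== CLAIM (what is proved, stated in full; the proofs are below) =====
def Claim_equal_find_current_step_py : Prop := ∀ (plan : List (List (String × String))), Dom_find_current_step_py plan → Spec_find_current_step_py plan (find_current_step_py plan)

-- ===== LEMMAS AND PROOFS =====
-- invariant for B's single pass: it equals "first in_progress, else pend, else first pending"
theorem pvScanB_eq (plan : List (List (String × String))) (i : Int)
    (pend : Option (Int × (Option (List (String × String))))) :
    pvScanB plan i pend =
      match pvScanA "in_progress" plan i with
      | some r => r
      | none => pend.getD ((pvScanA "pending" plan i).getD (-1, none)) := by
  induction plan generalizing i pend with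
  | nil => simp [pvScanB, pvScanA]
  | cons step rest ih =>
    simp only [pvScanB, pvScanA]
    by_cases h1 : (PySem.Dict.mk step).get? "status" = some "in_progress"
    · simp [h1]
    · by_cases h2 : (PySem.Dict.mk step).get? "status" = some "pending"
      · cases pend with
        | none => simp [h2, ih]
        | some p => simp [h2, ih]
      · simp [h1, h2, ih]

theorem find_current_step_py_spec : Claim_equal_find_current_step_py := by
  intro plan _
  unfold Spec_find_current_step_py find_current_step_py find_current_step_py_alt
  rw [pvScanB_eq]
  cases pvScanA "in_progress" plan 0 with
  | none => cases pvScanA "pending" plan 0 <;> simp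
  | some r => simp
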